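-- pv_equiv track=rewrite | github.com/mitasmario/extract_tables | table_reader.py | find_root_cells
-- ===== SOURCE A (Python) =====
-- def find_root_cells(super_sets: dict) -> list:
--     """
--     Find "root" cells, we can consider them as a separate tables
--
--     :param super_sets: dict with supersets
--     :return: list with indexes of root boxes
--     """
--     sub_sets = []
--     for sets in super_sets.values():
--         sub_sets += sets
--
--     # root boxes are considered as separate tables in page
--     root_boxes = []
--     for set_index in super_sets:
--         if set_index not in sub_sets:
--             root_boxes.append(set_index)
--
--     return root_boxes
-- ===== SOURCE B (Python) =====
-- def find_root_cells(super_sets: dict) -> list: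
--     # Sort all sub-set members once, then decide each key by binary search.
--     children = sorted(x for vs in super_sets.values() for x in vs)
--
--     def contains(x):
--         lo, hi = 0, len(children)
--         while lo < hi:
--             mid = (lo + hi) // 2
--             v = children[mid]
--             if v == x:
--                 return True
--             if v < x:
--                 lo = mid + 1
--             else:
--                 hi = mid
--         return False
--
--     return [k for k in super_sets if not contains(k)]
-- ===== Notes on version B (the rewrite author's own statement) =====
-- stated objective: faster
-- what changed: A concatenates all value lists and linearly scans that list for every key (quadratic); B sorts the flattened sub-set members once and decides each key by a hand-written binary search over the sorted list, filtering the keys in dict order.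
import Mathlib
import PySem

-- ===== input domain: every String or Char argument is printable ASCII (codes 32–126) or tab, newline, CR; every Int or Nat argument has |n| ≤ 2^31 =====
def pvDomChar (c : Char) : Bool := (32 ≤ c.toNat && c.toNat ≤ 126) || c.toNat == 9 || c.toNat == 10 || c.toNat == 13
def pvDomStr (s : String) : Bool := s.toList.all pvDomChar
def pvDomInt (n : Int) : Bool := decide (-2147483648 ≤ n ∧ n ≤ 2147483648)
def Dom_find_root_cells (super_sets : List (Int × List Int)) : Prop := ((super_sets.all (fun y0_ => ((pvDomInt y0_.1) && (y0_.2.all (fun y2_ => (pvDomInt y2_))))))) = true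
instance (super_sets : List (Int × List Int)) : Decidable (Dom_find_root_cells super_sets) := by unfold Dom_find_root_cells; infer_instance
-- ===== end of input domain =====

-- B replaces A's "concatenate all value lists, then linearly scan them per key" by
-- "sort the flattened sub-set members once, decide each key by binary search" (faster algorithm).


-- ===== PORT A =====
def find_root_cells (super_sets : List (Int × List Int)) : List Int :=
  -- sub_sets = []; for sets in super_sets.values(): sub_sets += sets
  let sub_sets : List Int := super_sets.foldl (fun acc p => acc ++ p.2) []
  -- root_boxes = []; for set_index in super_sets: if set_index not in sub_sets: append
  super_sets.foldl (fun rb p => if p.1 ∈ sub_sets then rb else rb ++ [p.1]) []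

-- ===== PORT B =====
-- while lo < hi: mid = (lo+hi)//2; v = children[mid]; compare  (hand-written binary search, as in Source B)
-- fuel = initial interval width bounds the iteration count (totality guard only)
def bsearchGo (children : List Int) (x : Int) : Nat → Nat → Nat → Bool
  | 0, _, _ => false
  | fuel + 1, lo, hi =>
    if lo < hi then
      let mid := (lo + hi) / 2
      let v := children.getD mid 0
      if v == x then true
      else if v < x then bsearchGo children x fuel (mid + 1) hi
      else bsearchGo children x fuel lo mid
    else false

def bsContains (children : List Int) (x : Int) : Bool :=
  bsearchGo children x children.length 0 children.length

def find_root_cells_alt (super_sets : List (Int × List Int)) : List Int :=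
  -- children = sorted(x for vs in super_sets.values() for x in vs)
  let children : List Int :=
    PySem.List.sorted (super_sets.flatMap (fun p => p.2)) (fun x => x) false
  -- [k for k in super_sets if not contains(k)]
  super_sets.foldl (fun out p => if bsContains children p.1 then out else out ++ [p.1]) []

-- ===== PRECONDITION & SPEC =====
def Spec_find_root_cells (super_sets : List (Int × List Int)) (out : List Int) : Prop := out = find_root_cells_alt super_sets
instance (super_sets : List (Int × List Int)) (out : List Int) : Decidable (Spec_find_root_cells super_sets out) := by unfold Spec_find_root_cells; infer_instance

-- ===== CLAIM (what is proved, stated in full; the proofs are below) =====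
def Claim_equal_find_root_cells : Prop := ∀ (super_sets : List (Int × List Int)), Dom_find_root_cells super_sets → Spec_find_root_cells super_sets (find_root_cells super_sets)

-- ===== LEMMAS AND PROOFS =====

-- A's value-concatenation loop builds the flattening
theorem subsets_eq_flatMap (l : List (Int × List Int)) :
    l.foldl (fun acc p => acc ++ p.2) [] = l.flatMap (fun p => p.2) := by
  simpa using PySem.List.foldl_append_eq_flatMap (fun p => p.2) l []

-- binary search on a (≤)-monotone list finds x iff some position in [lo, hi) holds x
theorem bsearchGo_iff (xs : List Int) (x : Int)
    (hmono : ∀ p q : Nat, p ≤ q → q < xs.length → xs.getD p 0 ≤ xs.getD q 0) :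
    ∀ (n lo hi : Nat), hi - lo ≤ n → hi ≤ xs.length →
      (bsearchGo xs x n lo hi = true ↔ ∃ i, lo ≤ i ∧ i < hi ∧ xs.getD i 0 = x) := by
  intro n
  induction n with
  | zero =>
      intro lo hi hn hlen
      simp only [bsearchGo, Bool.false_eq_true, false_iff]
      rintro ⟨i, h1, h2, -⟩
      omega
  | succ n ih =>
      intro lo hi hn hlen
      by_cases hlt : lo < hi
      · rw [bsearchGo, if_pos hlt]
        set mid := (lo + hi) / 2 with hmid
        have hmlo : lo ≤ mid := by omega
        have hmhi : mid < hi := by omega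
        by_cases hvx : xs.getD mid 0 = x
        · have hb : (xs.getD mid 0 == x) = true := beq_iff_eq.mpr hvx
          simp only [hb, if_true]
          exact iff_of_true trivial ⟨mid, hmlo, hmhi, hvx⟩
        · have hb : (xs.getD mid 0 == x) = false := by
            cases hbv : (xs.getD mid 0 == x)
            · rfl
            · exact absurd (beq_iff_eq.mp hbv) hvx
          simp only [hb, Bool.false_eq_true, if_false]
          by_cases hvlt : xs.getD mid 0 < x
          · simp only [hvlt, if_true]
            rw [ih (mid + 1) hi (by omega) hlen]
            constructor
            · rintro ⟨i, h1, h2, h3⟩; exact ⟨i, by omega, h2, h3⟩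
            · rintro ⟨i, h1, h2, h3⟩
              refine ⟨i, ?_, h2, h3⟩
              by_contra hni
              have hi_le : i ≤ mid := by omega
              have := hmono i mid hi_le (by omega)
              omega
          · simp only [hvlt, if_false]
            rw [ih lo mid (by omega) (by omega)]
            constructor
            · rintro ⟨i, h1, h2, h3⟩; exact ⟨i, h1, by omega, h3⟩
            · rintro ⟨i, h1, h2, h3⟩
              refine ⟨i, h1, ?_, h3⟩
              by_contra hni
              have := hmono mid i (by omega) (by omega)
              omega
      · rw [bsearchGo, if_neg hlt]
        simp only [Bool.false_eq_true, false_iff]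
        rintro ⟨i, h1, h2, -⟩
        omega

-- bsContains on a (≤)-monotone list is list membership
theorem bsContains_iff_mem (xs : List Int) (x : Int)
    (hmono : ∀ p q : Nat, p ≤ q → q < xs.length → xs.getD p 0 ≤ xs.getD q 0) :
    bsContains xs x = true ↔ x ∈ xs := by
  unfold bsContains
  rw [bsearchGo_iff xs x hmono xs.length 0 xs.length (by omega) le_rfl]
  constructor
  · rintro ⟨i, -, h2, h3⟩
    rw [List.getD_eq_getElem xs 0 h2] at h3
    exact h3 ▸ List.getElem_mem h2
  · intro hx
    obtain ⟨i, hi, hg⟩ := List.mem_iff_getElem.mp hx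
    exact ⟨i, Nat.zero_le i, hi, by rw [List.getD_eq_getElem xs 0 hi]; exact hg⟩

-- the sorted children list is (≤)-monotone position-wise
theorem sorted_getD_mono (l : List Int) (p q : Nat) (hpq : p ≤ q)
    (hq : q < (PySem.List.sorted l (fun x => x) false).length) :
    (PySem.List.sorted l (fun x => x) false).getD p 0 ≤ (PySem.List.sorted l (fun x => x) false).getD q 0 := by
  have hp : p < (PySem.List.sorted l (fun x => x) false).length := by omega
  rw [List.getD_eq_getElem _ 0 hp, List.getD_eq_getElem _ 0 hq]
  exact PySem.List.sorted_id_getElem_mono l hpq hq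

-- the two output loops agree because their tests agree on every traversed key
theorem foldl_filter_congr (l : List (Int × List Int)) (acc : List Int)
    (S : List Int) (c : Int → Bool) (h : ∀ p ∈ l, (c p.1 = true ↔ p.1 ∈ S)) :
    l.foldl (fun rb p => if p.1 ∈ S then rb else rb ++ [p.1]) acc
      = l.foldl (fun out p => if c p.1 then out else out ++ [p.1]) acc := by
  induction l generalizing acc with
  | nil => rfl
  | cons hd t ih =>
      have hhd := h hd (by simp)
      by_cases hs : hd.1 ∈ S
      · have hc : c hd.1 = true := hhd.mpr hs
        simp only [List.foldl_cons, if_pos hs, hc, if_true]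
        exact ih acc (fun p hp => h p (by simp [hp]))
      · have hc : c hd.1 = false := by
          cases hcv : c hd.1
          · rfl
          · exact absurd (hhd.mp hcv) hs
        simp only [List.foldl_cons, if_neg hs, hc, Bool.false_eq_true, if_false]
        exact ih (acc ++ [hd.1]) (fun p hp => h p (by simp [hp]))

-- ===== VERDICT (by name: the statement is the Claim_ definition above) =====
theorem find_root_cells_spec : Claim_equal_find_root_cells := by
  intro super_sets _
  unfold Spec_find_root_cells find_root_cells find_root_cells_alt
  rw [subsets_eq_flatMap]
  apply foldl_filter_congr
  intro p _
  rw [bsContains_iff_mem _ _ (sorted_getD_mono _), PySem.List.mem_sorted]
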